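-- pv_equiv track=rewrite | github.com/Mayumi-ito-map/Private | normalizers/edit_comma_abb.py | replace_abbreviation_with_dict
-- ===== SOURCE A (Python) =====
-- def replace_abbreviation_with_dict(text, abbreviation_dict):
--     # return [text]
--
--     # 以下は略語展開ありの場合に使用
--     results = [text]
--
--     for key, values in abbreviation_dict.items():
--         new_results = []
--         for r in results:
--             if key in r:
--                 new_results.append(r)  # ← 元を残す
--                 for v in values:
--                     new_results.append(r.replace(key, v))
--             else:
--                 new_results.append(r)
--
--         results = new_results
--
--     return list(set(results))
-- ===== SOURCE B (Python) =====
-- def _expand(t, items):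
--     # depth-first: branch on the first remaining key, recurse over the rest
--     if not items:
--         return [t]
--     (key, values), rest = items[0], items[1:]
--     branches = [t] + ([t.replace(key, v) for v in values] if key in t else [])
--     out = []
--     for b in branches:
--         out.extend(_expand(b, rest))
--     return out
--
--
-- def replace_abbreviation_with_dict(text, abbreviation_dict):
--     return list(set(_expand(text, list(abbreviation_dict.items()))))
-- ===== Notes on version B (the rewrite author's own statement) =====
-- stated objective: alternative
-- what changed: Replaces the breadth-first frontier loop (rebuilding the whole results list per dict key) with a depth-first recursion over the remaining dict items, generating each combination along one recursive path.
import Mathlib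
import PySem

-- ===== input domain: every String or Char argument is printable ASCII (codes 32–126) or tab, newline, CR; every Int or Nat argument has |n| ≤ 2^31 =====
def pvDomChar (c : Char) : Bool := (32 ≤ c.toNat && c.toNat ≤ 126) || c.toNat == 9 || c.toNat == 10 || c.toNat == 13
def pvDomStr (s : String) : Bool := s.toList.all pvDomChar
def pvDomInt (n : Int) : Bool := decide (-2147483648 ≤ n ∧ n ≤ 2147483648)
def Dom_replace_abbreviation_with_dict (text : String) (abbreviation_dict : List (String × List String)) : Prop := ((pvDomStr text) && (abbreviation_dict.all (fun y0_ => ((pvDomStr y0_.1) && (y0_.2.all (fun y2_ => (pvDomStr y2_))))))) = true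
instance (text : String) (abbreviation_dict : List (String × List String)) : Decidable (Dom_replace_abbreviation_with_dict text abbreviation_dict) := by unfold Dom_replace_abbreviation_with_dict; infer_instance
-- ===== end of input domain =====

-- B replaces A's breadth-first frontier loop with a depth-first recursion over the dict items (alternative decomposition, same cost).


-- ===== PORT A =====
-- literal port of A's frontier loop: for each (key, values) the whole results
-- list is rebuilt; list(set(...)) is PySem.Set.ofList (outputs compared as sets)
def replace_abbreviation_with_dict (text : String) (abbreviation_dict : List (String × List String)) : List String :=
  let results :=
    abbreviation_dict.foldl (fun results kv =>
      results.foldl (fun new_results r =>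
        if PySem.Str.isIn kv.1 r then
          kv.2.foldl (fun acc v => acc ++ [PySem.Str.replace r kv.1 v]) (new_results ++ [r])
        else
          new_results ++ [r]) []) [text]
  PySem.Set.ofList results

-- ===== PORT B =====
-- port of Source B's _expand: depth-first recursion over the remaining items
def pvExpand (t : String) (items : List (String × List String)) : List String :=
  match items with
  | [] => [t]
  | (key, values) :: rest =>
    let branches :=
      [t] ++ (if PySem.Str.isIn key t then values.map (fun v => PySem.Str.replace t key v) else [])
    branches.foldl (fun out b => out ++ pvExpand b rest) []
termination_by items.length
decreasing_by simp

def replace_abbreviation_with_dict_alt (text : String) (abbreviation_dict : List (String × List String)) : List String :=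
  PySem.Set.ofList (pvExpand text abbreviation_dict)

-- ===== PRECONDITION & SPEC =====
def Spec_replace_abbreviation_with_dict (text : String) (abbreviation_dict : List (String × List String)) (out : List String) : Prop := out = replace_abbreviation_with_dict_alt text abbreviation_dict
instance (text : String) (abbreviation_dict : List (String × List String)) (out : List String) : Decidable (Spec_replace_abbreviation_with_dict text abbreviation_dict out) := by unfold Spec_replace_abbreviation_with_dict; infer_instance

-- ===== CLAIM (what is proved, stated in full; the proofs are below) =====
def Claim_equal_replace_abbreviation_with_dict : Prop := ∀ (text : String) (abbreviation_dict : List (String × List String)), Dom_replace_abbreviation_with_dict text abbreviation_dict → Spec_replace_abbreviation_with_dict text abbreviation_dict (replace_abbreviation_with_dict text abbreviation_dict)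

-- ===== LEMMAS AND PROOFS =====

-- the branches produced for one string at one key
def pvBrs (kv : String × List String) (r : String) : List String :=
  r :: (if PySem.Str.isIn kv.1 r then kv.2.map (fun v => PySem.Str.replace r kv.1 v) else [])

-- A's inner loop over one frontier element equals appending pvBrs
theorem pvInner_eq (kv : String × List String) (nr : List String) (r : String) :
    (if PySem.Str.isIn kv.1 r then
       kv.2.foldl (fun acc v => acc ++ [PySem.Str.replace r kv.1 v]) (nr ++ [r])
     else nr ++ [r]) = nr ++ pvBrs kv r := by
  unfold pvBrs
  split <;> simp [← List.flatMap_def, ← List.map_eq_flatMap]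

-- B's recursion unfolded on a cons
theorem pvExpand_cons (t : String) (kv : String × List String) (rest : List (String × List String)) :
    pvExpand t (kv :: rest) = (pvBrs kv t).flatMap (fun b => pvExpand b rest) := by
  obtain ⟨key, values⟩ := kv
  rw [pvExpand]
  simp [pvBrs, List.flatMap_def]
  rfl

-- A's whole frontier loop equals flatMap of B's recursion, for any frontier
theorem pvLoop_eq (items : List (String × List String)) (results : List String) :
    items.foldl (fun results kv =>
      results.foldl (fun new_results r =>
        if PySem.Str.isIn kv.1 r then
          kv.2.foldl (fun acc v => acc ++ [PySem.Str.replace r kv.1 v]) (new_results ++ [r])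
        else
          new_results ++ [r]) []) results
    = results.flatMap (fun t => pvExpand t items) := by
  induction items generalizing results with
  | nil => simp [pvExpand]
  | cons kv rest ih =>
    simp only [List.foldl_cons]
    rw [ih]
    have hstep : (results.foldl (fun new_results r =>
        if PySem.Str.isIn kv.1 r then
          kv.2.foldl (fun acc v => acc ++ [PySem.Str.replace r kv.1 v]) (new_results ++ [r])
        else
          new_results ++ [r]) []) = results.flatMap (pvBrs kv) := by
      calc _ = results.foldl (fun nr r => nr ++ pvBrs kv r) [] := by
              apply PySem.List.foldl_congr_mem
              intro nr r _
              exact pvInner_eq kv nr r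
        _ = results.flatMap (pvBrs kv) := by
              simpa using PySem.List.foldl_append_eq_flatMap (pvBrs kv) results []
    rw [hstep, List.flatMap_assoc]
    congr 1
    funext t
    rw [pvExpand_cons]

-- ===== VERDICT (by name: the statement is the Claim_ definition above) =====
theorem replace_abbreviation_with_dict_spec : Claim_equal_replace_abbreviation_with_dict := by
  intro text abbreviation_dict _
  unfold Spec_replace_abbreviation_with_dict replace_abbreviation_with_dict replace_abbreviation_with_dict_alt
  rw [pvLoop_eq]
  simp
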